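-- pv_equiv track=rewrite | github.com/programelot/foobar-answer | Bringing a Gun to a Trainer Fight.py | solution
-- ===== SOURCE A (Python) =====
-- def sig(x):
--     return 1 if x > 0 else -1
--
-- def gcd(x, y):
--     if x < 0:
--         x = -x
--     if y < 0 :
--         y = -y
--     if x < y:
--         (x,y) = (y,x)
--     while True:
--         if x%y == 0:
--             return y
--         (x,y) = (y, x%y)
--
-- def line(p1, p2):
--     # 0 = ax + by + c
--     #return (a,b,c)
--     (a,b,c) = (p2[1] - p1[1], p1[0] - p2[0], p1[1]*p2[0] - p1[0]*p2[1])
--     if a == 0 and b == 0: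
--         return (0, 0, sig(c))
--     if a == 0 and c == 0:
--         return (0, sig(b), 0)
--     if b == 0 and c == 0:
--         return (sig(a), 0, 0)
--     if a == 0:
--         g = gcd(b, c)
--         return (a//g,b//g,c//g)
--     if b == 0:
--         g = gcd(a, c)
--         return (a//g,b//g,c//g)
--     if c == 0:
--         g = gcd(a, b)
--         return (a//g,b//g,c//g)
--     g = gcd(gcd(a,b),c)
--     return (a//g,b//g,c//g)
--
-- def dist(p1, p2):
--     #return distance ** 2
--     return (p1[0] - p2[0]) ** 2 + (p1[1] - p2[1]) ** 2
--
-- def solution(dimensions, your_position, trainer_position, distance):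
--     dx, dy = dimensions
--     dp = distance ** 2#distance power
--     minDim = min(dx, dy)
--     batch = distance//minDim + 1
--     yx, yy = your_position
--     tx, ty = trainer_position
--     lineDict = dict()
--     for y in range(-batch, batch + 1):
--         for x in range(-batch, batch + 1):
--             ttx, tty = tx, ty
--             if x%2 == 0:
--                 ttx = tx + x * dx
--             else:
--                 ttx = (x + 1) * dx - tx
--             if y%2 == 0:
--                 tty = ty + y * dy
--             else:
--                 tty = (y + 1) * dy - ty
--             d = dist((ttx, tty), (yx, yy))
--             if d <= dp:
--                 l = line((ttx, tty), (yx, yy))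
--                 p = (ttx - yx, tty - yy)
--                 if l in lineDict:
--                     if lineDict[l][0] > d:
--                         lineDict[l] = (d,p)
--                 else:
--                     lineDict[l] = (d, p)
--     for y in range(-batch, batch + 1):
--         for x in range(-batch, batch + 1):
--             tyx, tyy = yx, yy
--             if x%2 == 0:
--                 tyx = yx + x * dx
--             else:
--                 tyx = (x + 1) * dx - yx
--             if y%2 == 0:
--                 tyy = yy + y * dy
--             else:
--                 tyy = (y + 1) * dy - yy
--             d = dist((tyx, tyy), (yx, yy))
--             if d <= dp:
--                 l = line((tyx, tyy), (yx, yy))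
--                 p = (tyx - yx, tyy - yy)
--                 if l in lineDict:
--                     if lineDict[l][0] > d:
--                         del lineDict[l]
--     lineLst = list(lineDict)
--     n = len(lineLst)
--     return n
-- ===== SOURCE B (Python) =====
-- def _gcd(a, b):
--     while b:
--         a, b = b, a % b
--     return a
--
-- def solution(dimensions, your_position, trainer_position, distance):
--     dx, dy = dimensions
--     dp = distance ** 2
--     batch = distance // min(dx, dy) + 1
--     yx, yy = your_position
--     tx, ty = trainer_position
--     best = {}  # reduced direction -> (squared distance of nearest image, is_trainer)
--     for y in range(-batch, batch + 1):
--         ry = (y + 1) * dy - ty if y % 2 else ty + y * dy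
--         sy = (y + 1) * dy - yy if y % 2 else yy + y * dy
--         for x in range(-batch, batch + 1):
--             rx = (x + 1) * dx - tx if x % 2 else tx + x * dx
--             sx = (x + 1) * dx - yx if x % 2 else yx + x * dx
--             for px, py, owner in ((rx, ry, True), (sx, sy, False)):
--                 u, v = px - yx, py - yy
--                 d = u * u + v * v
--                 if d > dp:
--                     continue
--                 g = _gcd(abs(u), abs(v)) or 1
--                 key = (u // g, v // g)
--                 cur = best.get(key)
--                 if cur is None or d < cur[0] or (d == cur[0] and owner and not cur[1]):
--                     best[key] = (d, owner)
--     return sum(1 for _, owner in best.values() if owner)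
-- ===== Notes on version B (the rewrite author's own statement) =====
-- stated objective: alternative
-- what changed: Replaces A's two separate grid passes over a dict keyed by normalized line equations (with a delete pass for self-images) by a single merged pass over the mirror grid that keys one dict by the gcd-reduced direction vector and keeps per direction only the nearest image together with who owns it (trainer wins ties), counting trainer-owned directions at the end.
import Mathlib
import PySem

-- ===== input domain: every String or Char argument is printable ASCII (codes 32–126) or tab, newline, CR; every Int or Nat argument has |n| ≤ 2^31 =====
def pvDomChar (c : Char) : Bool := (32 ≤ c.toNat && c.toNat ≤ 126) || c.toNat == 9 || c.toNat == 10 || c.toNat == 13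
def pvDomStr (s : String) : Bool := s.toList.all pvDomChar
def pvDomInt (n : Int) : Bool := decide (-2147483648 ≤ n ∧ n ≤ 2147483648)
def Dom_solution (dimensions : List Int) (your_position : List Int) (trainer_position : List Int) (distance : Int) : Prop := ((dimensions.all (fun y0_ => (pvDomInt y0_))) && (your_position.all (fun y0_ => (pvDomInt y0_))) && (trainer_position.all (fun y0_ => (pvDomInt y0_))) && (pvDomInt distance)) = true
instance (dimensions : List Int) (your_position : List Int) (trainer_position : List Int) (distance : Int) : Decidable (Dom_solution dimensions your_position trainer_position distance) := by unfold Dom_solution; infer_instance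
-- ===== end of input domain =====

-- B replaces A's two grid passes over a dict keyed by normalized line equations (build minima,
-- then delete on self-images) by ONE merged pass keyed by the gcd-reduced direction vector,
-- keeping per direction the nearest image and its owner (trainer wins ties), then counting
-- trainer-owned directions; objective: alternative (same asymptotic cost).

-- ===== PORT A =====
def sigA (x : Int) : Int := if x > 0 then 1 else -1

-- A's gcd loop; Python raises ZeroDivisionError when the second operand is 0 (unreachable from
-- line's call sites), the port returns 0 there.
def gcdLoopA (x y : Int) : Int :=
  if _h : y = 0 then 0
  else if PySem.Int.mod x y = 0 then y
  else gcdLoopA y (PySem.Int.mod x y)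
termination_by y.natAbs
decreasing_by
  rcases lt_trichotomy y 0 with hy | hy | hy
  · have h1 := PySem.Int.mod_neg_bounds x hy
    omega
  · omega
  · have h1 := PySem.Int.mod_nonneg x hy
    have h2 := PySem.Int.mod_lt x hy
    omega

def gcdA (x y : Int) : Int :=
  let x1 := if x < 0 then -x else x
  let y1 := if y < 0 then -y else y
  if x1 < y1 then gcdLoopA y1 x1 else gcdLoopA x1 y1

def lineA (p1 p2 : Int × Int) : Int × Int × Int :=
  let a := p2.2 - p1.2
  let b := p1.1 - p2.1
  let c := p1.2 * p2.1 - p1.1 * p2.2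
  if a = 0 ∧ b = 0 then (0, 0, sigA c)
  else if a = 0 ∧ c = 0 then (0, sigA b, 0)
  else if b = 0 ∧ c = 0 then (sigA a, 0, 0)
  else if a = 0 then
    let g := gcdA b c
    (PySem.Int.floordiv a g, PySem.Int.floordiv b g, PySem.Int.floordiv c g)
  else if b = 0 then
    let g := gcdA a c
    (PySem.Int.floordiv a g, PySem.Int.floordiv b g, PySem.Int.floordiv c g)
  else if c = 0 then
    let g := gcdA a b
    (PySem.Int.floordiv a g, PySem.Int.floordiv b g, PySem.Int.floordiv c g)
  else
    let g := gcdA (gcdA a b) c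
    (PySem.Int.floordiv a g, PySem.Int.floordiv b g, PySem.Int.floordiv c g)

def distA (p1 p2 : Int × Int) : Int := (p1.1 - p2.1) ^ 2 + (p1.2 - p2.2) ^ 2

-- the mirrored coordinate `t + x*d` / `(x+1)*d - t` (shared helper; both Pythons compute it inline)
def mir (d t x : Int) : Int := if PySem.Int.mod x 2 = 0 then t + x * d else (x + 1) * d - t

-- body of A's first (trainer-image) loop
def stepA1 (dx dy yx yy tx ty dp : Int) (D : PySem.Dict (Int × Int × Int) (Int × (Int × Int)))
    (y x : Int) : PySem.Dict (Int × Int × Int) (Int × (Int × Int)) :=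
  let ttx := mir dx tx x
  let tty := mir dy ty y
  let d := distA (ttx, tty) (yx, yy)
  if d ≤ dp then
    let l := lineA (ttx, tty) (yx, yy)
    let p := (ttx - yx, tty - yy)
    if D.contains l then
      (if (D.getD l (0, (0, 0))).1 > d then D.insert l (d, p) else D)
    else D.insert l (d, p)
  else D

-- body of A's second (self-image) loop
def stepA2 (dx dy yx yy dp : Int) (D : PySem.Dict (Int × Int × Int) (Int × (Int × Int)))
    (y x : Int) : PySem.Dict (Int × Int × Int) (Int × (Int × Int)) :=
  let tyx := mir dx yx x
  let tyy := mir dy yy y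
  let d := distA (tyx, tyy) (yx, yy)
  if d ≤ dp then
    let l := lineA (tyx, tyy) (yx, yy)
    if D.contains l then
      (if (D.getD l (0, (0, 0))).1 > d then D.erase l else D)
    else D
  else D

def solution (dimensions : List Int) (your_position : List Int) (trainer_position : List Int) (distance : Int) : Int :=
  match dimensions, your_position, trainer_position with
  | [dx, dy], [yx, yy], [tx, ty] =>
    let dp := distance ^ 2
    let minDim := min dx dy
    let batch := PySem.Int.floordiv distance minDim + 1
    let rng := PySem.List.pyRange (-batch) (batch + 1) 1
    let D1 := rng.foldl (fun D y => rng.foldl (fun D x => stepA1 dx dy yx yy tx ty dp D y x) D) PySem.Dict.empty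
    let D2 := rng.foldl (fun D y => rng.foldl (fun D x => stepA2 dx dy yx yy dp D y x) D) D1
    (D2.size : Int)
  | _, _, _ => 0

-- ===== PORT B =====
-- B-side destructuring of a two-element argument list
def two? (l : List Int) : Option (Int × Int) :=
  match l with
  | a :: t =>
    match t with
    | b :: t2 => (match t2 with | [] => some (a, b) | _ :: _ => none)
    | [] => none
  | [] => none

-- Source B's mirrored coordinate `(x+1)*d - t if x % 2 else t + x*d`
def mirB (d t x : Int) : Int := if PySem.Int.mod x 2 ≠ 0 then (x + 1) * d - t else t + x * d

-- Source B's `_gcd` (iterative Euclid on absolute values)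
def gcdB (a b : Int) : Int :=
  if _h : b = 0 then a else gcdB b (PySem.Int.mod a b)
termination_by b.natAbs
decreasing_by
  rcases lt_trichotomy b 0 with hb | hb | hb
  · have h1 := PySem.Int.mod_neg_bounds a hb
    omega
  · omega
  · have h1 := PySem.Int.mod_nonneg a hb
    have h2 := PySem.Int.mod_lt a hb
    omega

-- Source B's reduced direction key `(u // g, v // g)` with `g = _gcd(abs(u), abs(v)) or 1`
def redB (u v : Int) : Int × Int :=
  let g0 := gcdB (if u < 0 then -u else u) (if v < 0 then -v else v)
  let g := if g0 = 0 then 1 else g0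
  (PySem.Int.floordiv u g, PySem.Int.floordiv v g)

-- body of Source B's innermost loop over the two images (point, owner)
def stepB (yx yy dp : Int) (D : PySem.Dict (Int × Int) (Int × Bool))
    (pe : (Int × Int) × Bool) : PySem.Dict (Int × Int) (Int × Bool) :=
  let u := pe.1.1 - yx
  let v := pe.1.2 - yy
  let d := u * u + v * v
  if d > dp then D
  else
    let key := redB u v
    match D.get? key with
    | none => D.insert key (d, pe.2)
    | some cur =>
      if d < cur.1 ∨ (d = cur.1 ∧ pe.2 = true ∧ cur.2 = false) then D.insert key (d, pe.2) else D

def solution_alt (dimensions : List Int) (your_position : List Int) (trainer_position : List Int) (distance : Int) : Int :=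
  match two? dimensions, two? your_position, two? trainer_position with
  | some (dx, dy), some (yx, yy), some (tx, ty) =>
    let dp := distance ^ 2
    let batch := PySem.Int.floordiv distance (min dx dy) + 1
    let rng := PySem.List.pyRange (-batch) (batch + 1) 1
    let best := rng.foldl (fun D y =>
      let ry := mirB dy ty y
      let sy := mirB dy yy y
      rng.foldl (fun D x =>
        let rx := mirB dx tx x
        let sx := mirB dx yx x
        [((rx, ry), true), ((sx, sy), false)].foldl (stepB yx yy dp) D) D) PySem.Dict.empty
    ((best.values.filter (fun p => p.2)).length : Int)
  | _, _, _ => 0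

-- ===== PRECONDITION & SPEC =====
-- Pre_ excludes exactly the inputs where Python A raises: an argument list that does not unpack
-- into two values (ValueError/TypeError) and min(dimensions) == 0 (ZeroDivisionError).
def Pre_solution (dimensions : List Int) (your_position : List Int) (trainer_position : List Int) (distance : Int) : Prop :=
  dimensions.length = 2 ∧ your_position.length = 2 ∧ trainer_position.length = 2 ∧
    min (dimensions.getD 0 0) (dimensions.getD 1 0) ≠ 0
instance (dimensions : List Int) (your_position : List Int) (trainer_position : List Int) (distance : Int) : Decidable (Pre_solution dimensions your_position trainer_position distance) := by unfold Pre_solution; infer_instance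

def pvWitness_solution : List Int × List Int × List Int × Int := ([3, 2], [1, 1], [2, 1], 4)

def Spec_solution (dimensions : List Int) (your_position : List Int) (trainer_position : List Int) (distance : Int) (out : Int) : Prop := out = solution_alt dimensions your_position trainer_position distance
instance (dimensions : List Int) (your_position : List Int) (trainer_position : List Int) (distance : Int) (out : Int) : Decidable (Spec_solution dimensions your_position trainer_position distance out) := by unfold Spec_solution; infer_instance

-- ===== CLAIM (what is proved, stated in full; the proofs are below) =====
def Claim_equal_solution : Prop := ∀ (dimensions : List Int) (your_position : List Int) (trainer_position : List Int) (distance : Int), Dom_solution dimensions your_position trainer_position distance → Pre_solution dimensions your_position trainer_position distance → Spec_solution dimensions your_position trainer_position distance (solution dimensions your_position trainer_position distance)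

-- ===== LEMMAS AND PROOFS =====

-- ---------- Phase 1: arithmetic (gcd and the line normal form) ----------

theorem gcd_emod_step (x y : Int) : Int.gcd y (x % y) = Int.gcd x y := by
  have h : x % y = x + -(x / y) * y := by rw [Int.emod_def]; ring
  rw [h, Int.gcd_add_mul_right_right, Int.gcd_comm]

theorem gcdLoopA_eq (x y : Int) (hy : 0 < y) : gcdLoopA x y = (Int.gcd x y : Int) := by
  have H : ∀ n : Nat, ∀ x y : Int, y.natAbs ≤ n → 0 < y → gcdLoopA x y = (Int.gcd x y : Int) := by
    intro n
    induction n with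
    | zero => intro x y hle hy; omega
    | succ n IH =>
      intro x y hle hy
      have hy0 : ¬ y = 0 := by omega
      rw [gcdLoopA, PySem.Int.mod_eq_emod_of_pos hy]
      simp only [hy0, dite_false]
      by_cases hm : x % y = 0
      · simp only [hm, if_true]
        have hdvd : y ∣ x := Int.dvd_of_emod_eq_zero hm
        rw [Int.gcd_eq_natAbs_right_iff_dvd.mpr hdvd]
        omega
      · simp only [hm, if_false]
        have hlt := Int.emod_lt_of_pos x hy
        have hnn := Int.emod_nonneg x hy0
        rw [IH y (x % y) (by omega) (by omega), gcd_emod_step]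
  exact H y.natAbs x y le_rfl hy

theorem gcdA_eq (x y : Int) (hx : x ≠ 0) (hy : y ≠ 0) : gcdA x y = (Int.gcd x y : Int) := by
  simp only [gcdA]
  have e1 : (if x < 0 then -x else x) = (x.natAbs : Int) := by omega
  have e2 : (if y < 0 then -y else y) = (y.natAbs : Int) := by omega
  rw [e1, e2]
  split
  · rw [gcdLoopA_eq _ _ (by omega)]
    simp [Int.gcd, Int.natAbs_abs, Nat.gcd_comm]
  · rw [gcdLoopA_eq _ _ (by omega)]
    simp [Int.gcd, Int.natAbs_abs]

theorem gcdB_eq (a b : Int) (ha : 0 ≤ a) (hb : 0 ≤ b) : gcdB a b = (Int.gcd a b : Int) := by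
  have H : ∀ n : Nat, ∀ a b : Int, b.natAbs ≤ n → 0 ≤ a → 0 ≤ b → gcdB a b = (Int.gcd a b : Int) := by
    intro n
    induction n with
    | zero =>
      intro a b hle ha hb
      have hb0 : b = 0 := by omega
      subst hb0
      rw [gcdB, dif_pos rfl, Int.gcd_zero_right]
      omega
    | succ n IH =>
      intro a b hle ha hb
      rw [gcdB]
      by_cases hb0 : b = 0
      · subst hb0; rw [dif_pos rfl, Int.gcd_zero_right]; omega
      · simp only [hb0, dite_false]
        have hbpos : 0 < b := by omega
        rw [PySem.Int.mod_eq_emod_of_pos hbpos]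
        have hlt := Int.emod_lt_of_pos a hbpos
        have hnn := Int.emod_nonneg a hb0
        rw [IH b (a % b) (by omega) hb hnn, gcd_emod_step]
  exact H b.natAbs a b le_rfl ha hb

-- normal form of A's line key: the gcd-reduced direction (B's key) determines it
def lineOf (X Y : Int) (k : Int × Int) : Int × Int × Int :=
  if k = (0, 0) then (0, 0, -1) else (-k.2, k.1, k.2 * X - k.1 * Y)

theorem sigA_neg (v : Int) (h : v ≠ 0) : sigA (-v) = -sigA v := by
  unfold sigA; split_ifs <;> omega

theorem mul_div_natAbs (u k : Int) (h : u ≠ 0) : (u * k) / (u.natAbs : Int) = sigA u * k := by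
  rcases lt_or_gt_of_ne h with hneg | hpos
  · have e : (u.natAbs : Int) = -u := by omega
    rw [e, Int.ediv_neg, Int.mul_ediv_cancel_left k h]
    have : sigA u = -1 := by unfold sigA; split_ifs <;> omega
    rw [this]; ring
  · have e : (u.natAbs : Int) = u := by omega
    rw [e, Int.mul_ediv_cancel_left k h]
    have : sigA u = 1 := by unfold sigA; split_ifs <;> omega
    rw [this]; ring

theorem div_self_natAbs (u : Int) (h : u ≠ 0) : u / (u.natAbs : Int) = sigA u := by
  have := mul_div_natAbs u 1 h
  simpa using this

theorem redB_zero : redB 0 0 = (0, 0) := by decide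

theorem redB_eq (u v : Int) (h : ¬(u = 0 ∧ v = 0)) :
    redB u v = (u / (Int.gcd u v : Int), v / (Int.gcd u v : Int)) := by
  simp only [redB]
  have e1 : (if u < 0 then -u else u) = (u.natAbs : Int) := by omega
  have e2 : (if v < 0 then -v else v) = (v.natAbs : Int) := by omega
  rw [e1, e2, gcdB_eq _ _ (by positivity) (by positivity)]
  have eg : Int.gcd (u.natAbs : Int) (v.natAbs : Int) = Int.gcd u v := by
    simp [Int.gcd, Int.natAbs_abs]
  rw [eg]
  have hg : Int.gcd u v ≠ 0 := by
    intro h0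
    exact h (Int.gcd_eq_zero_iff.mp h0)
  have hg' : ¬ ((Int.gcd u v : Int) = 0) := by exact_mod_cast hg
  have hgpos : (0 : Int) < (Int.gcd u v : Int) := by
    have := Nat.pos_of_ne_zero hg
    exact_mod_cast this
  simp only [hg', if_false]
  rw [PySem.Int.floordiv_eq_ediv_of_pos hgpos, PySem.Int.floordiv_eq_ediv_of_pos hgpos]

theorem lineA_normal (X Y u v : Int) :
    lineA (X + u, Y + v) (X, Y) = lineOf X Y (redB u v) := by
  simp only [lineA]
  rw [show Y - (Y + v) = -v from by ring, show X + u - X = u from by ring,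
      show (Y + v) * X - (X + u) * Y = v * X - u * Y from by ring]
  by_cases h0 : u = 0 ∧ v = 0
  · obtain ⟨hu, hv⟩ := h0
    subst hu; subst hv
    rw [redB_zero]
    norm_num [lineOf, sigA]
  · rw [redB_eq u v h0]
    have hsig : ∀ w : Int, w ≠ 0 → sigA w ≠ 0 := by
      intro w hw; unfold sigA; split_ifs <;> omega
    by_cases hv0 : v = 0
    · -- v = 0, so u ≠ 0 : the direction is (sign u, 0)
      have hune : u ≠ 0 := fun hh => h0 ⟨hh, hv0⟩
      subst hv0
      simp only [Int.gcd_zero_right, Int.zero_ediv]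
      rw [div_self_natAbs u hune]
      have hNpos : (0 : Int) < (u.natAbs : Int) := by omega
      by_cases hY : Y = 0
      · subst hY
        norm_num [lineOf, hune, hsig u hune]
      · simp only [lineOf, neg_zero, zero_mul, zero_sub, neg_eq_zero, mul_eq_zero,
          Prod.mk.injEq, hune, hY, hsig u hune, false_and, and_false, if_false,
          if_true, or_self, if_neg hune]
        rw [show -(u * Y) = u * -Y from by ring]
        have hgc : gcdA u (u * -Y) = (u.natAbs : Int) := by
          rw [gcdA_eq u (u * -Y) hune (mul_ne_zero hune (neg_ne_zero.mpr hY))]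
          have := Int.gcd_mul_left u 1 (-Y)
          simpa using this
        rw [hgc, PySem.Int.floordiv_eq_ediv_of_pos hNpos, PySem.Int.floordiv_eq_ediv_of_pos hNpos,
            PySem.Int.floordiv_eq_ediv_of_pos hNpos, Int.zero_ediv, div_self_natAbs u hune,
            mul_div_natAbs u (-Y) hune]
        refine ⟨rfl, rfl, by ring⟩
    · by_cases hu0 : u = 0
      · -- u = 0, v ≠ 0 : the direction is (0, sign v)
        subst hu0
        simp only [Int.gcd_zero_left, Int.zero_ediv]
        rw [div_self_natAbs v hv0]
        have hNpos : (0 : Int) < (v.natAbs : Int) := by omega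
        by_cases hX : X = 0
        · subst hX
          simp only [lineOf, neg_eq_zero, mul_zero, zero_mul, sub_zero, zero_sub,
            Prod.mk.injEq, hv0, hsig v hv0, false_and, and_false, if_false,
            if_true, or_self, and_true]
          exact sigA_neg v hv0
        · simp only [lineOf, neg_eq_zero, mul_zero, zero_mul, sub_zero, zero_sub,
            mul_eq_zero, Prod.mk.injEq, hv0, hX, hsig v hv0, false_and, and_false,
            if_false, if_true, or_self, and_true]
          have hgc : gcdA (-v) (v * X) = (v.natAbs : Int) := by
            rw [gcdA_eq (-v) (v * X) (neg_ne_zero.mpr hv0) (mul_ne_zero hv0 hX), Int.neg_gcd]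
            have := Int.gcd_mul_left v 1 X
            simpa using this
          rw [hgc, PySem.Int.floordiv_eq_ediv_of_pos hNpos, PySem.Int.floordiv_eq_ediv_of_pos hNpos,
              PySem.Int.floordiv_eq_ediv_of_pos hNpos, Int.zero_ediv,
              show -v = v * -1 from by ring, mul_div_natAbs v (-1) hv0, mul_div_natAbs v X hv0]
          refine ⟨by ring, rfl, rfl⟩
      · -- u ≠ 0 and v ≠ 0
        set G : Int := (Int.gcd u v : Int) with hGdef
        have hgne : Int.gcd u v ≠ 0 := fun hh => h0 (Int.gcd_eq_zero_iff.mp hh)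
        have hGpos : 0 < G := by rw [hGdef]; exact_mod_cast Nat.pos_of_ne_zero hgne
        have hGne : G ≠ 0 := ne_of_gt hGpos
        have hu : G * (u / G) = u := by
          rw [mul_comm]; exact Int.ediv_mul_cancel (Int.gcd_dvd_left u v)
        have hv' : G * (v / G) = v := by
          rw [mul_comm]; exact Int.ediv_mul_cancel (Int.gcd_dvd_right u v)
        have hnegv : (-v) / G = -(v / G) := by
          conv_lhs => rw [← hv']
          rw [show -(G * (v / G)) = G * -(v / G) from by ring, Int.mul_ediv_cancel_left _ hGne]
        have hp0 : u / G ≠ 0 := by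
          intro hp; exact hu0 (by rw [← hu, hp, mul_zero])
        have hgab : gcdA (-v) u = G := by
          rw [gcdA_eq (-v) u (neg_ne_zero.mpr hv0) hu0, hGdef, Int.neg_gcd]
          norm_num [Int.gcd_comm v u]
        have hcw : v * X - u * Y = G * ((v / G) * X - (u / G) * Y) := by
          calc v * X - u * Y = (G * (v / G)) * X - (G * (u / G)) * Y := by rw [hu, hv']
            _ = G * ((v / G) * X - (u / G) * Y) := by ring
        simp only [lineOf, neg_eq_zero, Prod.mk.injEq, hv0, hu0, false_and, and_false,
          if_false, hp0]
        by_cases hc0 : v * X - u * Y = 0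
        · rw [if_pos hc0, hgab, hc0]
          have hw0 : v / G * X - u / G * Y = 0 := by
            have h1 : G * (v / G * X - u / G * Y) = 0 := by rw [← hcw, hc0]
            exact (mul_eq_zero.mp h1).resolve_left hGne
          rw [PySem.Int.floordiv_eq_ediv_of_pos hGpos, PySem.Int.floordiv_eq_ediv_of_pos hGpos,
              PySem.Int.floordiv_eq_ediv_of_pos hGpos, hnegv, hw0, Int.zero_ediv]
        · rw [if_neg hc0, hgab]
          have hgc : gcdA G (v * X - u * Y) = G := by
            rw [gcdA_eq G (v * X - u * Y) hGne hc0, hcw]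
            have h2 := Int.gcd_mul_left G 1 (v / G * X - u / G * Y)
            simp only [mul_one] at h2
            rw [h2]
            simp [Int.one_gcd]
            omega
          rw [hgc, PySem.Int.floordiv_eq_ediv_of_pos hGpos, PySem.Int.floordiv_eq_ediv_of_pos hGpos,
              PySem.Int.floordiv_eq_ediv_of_pos hGpos, hnegv, hcw, Int.mul_ediv_cancel_left _ hGne]

theorem lineOf_inj (X Y : Int) : Function.Injective (lineOf X Y) := by
  rintro ⟨p, q⟩ ⟨p', q'⟩ h
  unfold lineOf at h
  split_ifs at h with h1 h2 h2 <;>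
    simp only [Prod.mk.injEq] at h h1 h2 ⊢ <;> omega

-- ---------- Phase 2: dict lemmas and abstract per-key updaters ----------

theorem dict_get?_erase_self {κ ν : Type} [BEq κ] [LawfulBEq κ] (d : PySem.Dict κ ν) (k : κ) :
    (d.erase k).get? k = none := by
  obtain ⟨items⟩ := d
  simp only [PySem.Dict.erase, PySem.Dict.get?]
  induction items with
  | nil => rfl
  | cons p rest IH =>
    by_cases hp : p.1 = k
    · simpa [hp] using IH
    · simpa [List.filter_cons, hp] using IH

theorem dict_get?_erase_of_ne {κ ν : Type} [BEq κ] [LawfulBEq κ] (d : PySem.Dict κ ν) (k k' : κ)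
    (h : k' ≠ k) : (d.erase k).get? k' = d.get? k' := by
  obtain ⟨items⟩ := d
  simp only [PySem.Dict.erase, PySem.Dict.get?]
  congr 1
  induction items with
  | nil => rfl
  | cons p rest IH =>
    rw [List.filter_cons]
    by_cases hp : p.1 = k
    · rw [if_neg (by simp [hp]), List.find?_cons_of_neg (by simp [hp]; exact fun hh => h hh.symm)]
      exact IH
    · rw [if_pos (by simp [hp])]
      by_cases hq : p.1 = k'
      · rw [List.find?_cons_of_pos (by simp [hq]), List.find?_cons_of_pos (by simp [hq])]
      · rw [List.find?_cons_of_neg (by simp [hq]), List.find?_cons_of_neg (by simp [hq])]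
        exact IH

theorem dict_nodup_keys_erase {κ ν : Type} [BEq κ] (d : PySem.Dict κ ν) (k : κ)
    (h : d.keys.Nodup) : (d.erase k).keys.Nodup := by
  exact h.sublist (List.filter_sublist.map _)

theorem foldl_preserve {σ α : Type} (P : σ → Prop) (f : σ → α → σ)
    (h : ∀ s a, P s → P (f s a)) : ∀ (L : List α) (s : σ), P s → P (L.foldl f s) := by
  intro L
  induction L with
  | nil => intro s hs; exact hs
  | cons a L IH => intro s hs; exact IH _ (h s a hs)

-- the three per-key updaters (what one loop step does to one key's entry)
def updA {β : Type} (a : Option (Int × β)) (e : Int × β) : Option (Int × β) :=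
  match a with
  | none => some e
  | some cur => if e.1 < cur.1 then some e else some cur

def updD {β : Type} (a : Option (Int × β)) (d : Int) : Option (Int × β) :=
  match a with
  | none => none
  | some cur => if d < cur.1 then none else some cur

def updB (a : Option (Int × Bool)) (e : Int × Bool) : Option (Int × Bool) :=
  match a with
  | none => some e
  | some cur => if e.1 < cur.1 ∨ (e.1 = cur.1 ∧ e.2 = true ∧ cur.2 = false) then some e else some cur

theorem foldA_none {β : Type} (l : List (Int × β)) :
    l.foldl updA none = none ↔ l = [] := by
  induction l using List.reverseRecOn with
  | nil => simp
  | append_singleton l e IH =>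
    rw [List.foldl_append]
    constructor
    · intro h
      cases ha : l.foldl updA (none : Option (Int × β)) with
      | none => rw [ha] at h; simp [updA] at h
      | some b => rw [ha] at h; simp only [updA, List.foldl] at h; split at h <;> simp_all
    · intro h; simp at h

theorem foldA_min {β : Type} (l : List (Int × β)) (a : Int × β)
    (h : l.foldl updA none = some a) :
    (∃ e ∈ l, a.1 = e.1) ∧ (∀ e ∈ l, a.1 ≤ e.1) := by
  induction l using List.reverseRecOn generalizing a with
  | nil => simp [List.foldl] at h
  | append_singleton l e IH =>
    rw [List.foldl_append] at h
    cases ha : l.foldl updA (none : Option (Int × β)) with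
    | none =>
      have hl : l = [] := (foldA_none l).mp ha
      subst hl
      simp only [List.foldl, ha, updA] at h
      cases h
      simp
    | some b =>
      rw [ha] at h
      obtain ⟨IH1, IH2⟩ := IH b ha
      simp only [List.foldl, updA] at h
      split at h <;> rename_i hcmp <;> cases h
      · constructor
        · exact ⟨e, by simp, rfl⟩
        · intro e' he'
          rcases List.mem_append.mp he' with h' | h'
          · exact le_of_lt (lt_of_lt_of_le hcmp (IH2 e' h'))
          · simp at h'; subst h'; exact le_refl _
      · constructor
        · obtain ⟨e', he', hb⟩ := IH1
          exact ⟨e', by simp [he'], hb⟩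
        · intro e' he'
          rcases List.mem_append.mp he' with h' | h'
          · exact IH2 e' h'
          · simp at h'; subst h'; omega

theorem foldD_char {β : Type} (ds : List Int) (a0 : Option (Int × β)) :
    ds.foldl updD a0 = match a0 with
      | none => none
      | some cur => if ∃ d ∈ ds, d < cur.1 then none else some cur := by
  induction ds generalizing a0 with
  | nil => cases a0 <;> simp
  | cons d ds IH =>
    rw [List.foldl_cons, IH]
    cases a0 with
    | none => simp [updD]
    | some cur =>
      simp only [updD]
      by_cases hd : d < cur.1
      · simp [hd]
      · simp only [hd, if_false]
        by_cases hex : ∃ d' ∈ ds, d' < cur.1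
        · rw [if_pos hex,
              if_pos (by obtain ⟨d', hd', hlt⟩ := hex; exact ⟨d', List.mem_cons.mpr (Or.inr hd'), hlt⟩)]
        · rw [if_neg hex, if_neg (by
            rintro ⟨d', hd', hlt⟩
            rcases List.mem_cons.mp hd' with h' | h'
            · exact hd (h' ▸ hlt)
            · exact hex ⟨d', h', hlt⟩)]

theorem foldB_none (l : List (Int × Bool)) :
    l.foldl updB none = none ↔ l = [] := by
  induction l using List.reverseRecOn with
  | nil => simp
  | append_singleton l e IH =>
    rw [List.foldl_append]
    constructor
    · intro h
      cases ha : l.foldl updB (none : Option (Int × Bool)) with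
      | none => rw [ha] at h; simp [updB] at h
      | some b => rw [ha] at h; simp only [updB, List.foldl] at h; split at h <;> simp_all
    · intro h; simp at h

theorem foldB_min (l : List (Int × Bool)) (a : Int × Bool)
    (h : l.foldl updB none = some a) :
    (∃ e ∈ l, a.1 = e.1) ∧ (∀ e ∈ l, a.1 ≤ e.1) ∧
      (a.2 = true ↔ ∃ e ∈ l, e.1 = a.1 ∧ e.2 = true) := by
  induction l using List.reverseRecOn generalizing a with
  | nil => simp [List.foldl] at h
  | append_singleton l e IH =>
    rw [List.foldl_append] at h
    cases ha : l.foldl updB (none : Option (Int × Bool)) with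
    | none =>
      have hl : l = [] := (foldB_none l).mp ha
      subst hl
      simp only [List.foldl, ha, updB] at h
      cases h
      simp
    | some b =>
      rw [ha] at h
      obtain ⟨IH1, IH2, IH3⟩ := IH b ha
      simp only [List.foldl, updB] at h
      split at h <;> rename_i hcmp <;> cases h
      · -- the new event replaces b : e.1 < b.1, or tie with owner upgrade
        rcases hcmp with hlt | ⟨heq, he2, hb2⟩
        · refine ⟨⟨e, by simp, rfl⟩, ?_, ?_⟩
          · intro e' he'
            rcases List.mem_append.mp he' with h' | h'
            · exact le_of_lt (lt_of_lt_of_le hlt (IH2 e' h'))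
            · simp at h'; subst h'; exact le_refl _
          · constructor
            · intro he2'
              exact ⟨e, by simp, rfl, he2'⟩
            · intro ⟨e', he', h1', h2'⟩
              rcases List.mem_append.mp he' with h' | h'
              · exact absurd (IH2 e' h') (by omega)
              · simp at h'; subst h'; exact h2'
        · refine ⟨⟨e, by simp, rfl⟩, ?_, ?_⟩
          · intro e' he'
            rcases List.mem_append.mp he' with h' | h'
            · rw [heq]; exact IH2 e' h'
            · simp at h'; subst h'; exact le_refl _
          · constructor
            · intro he2'
              exact ⟨e, by simp, rfl, he2'⟩
            · intro _; exact he2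
      · -- the old entry is kept (cases h substitutes a for b)
        have hbe : a.1 ≤ e.1 := by
          by_contra hlt
          exact hcmp (Or.inl (by omega))
        have himp : e.1 = a.1 → e.2 = true → a.2 = true := by
          intro h1 h2
          by_contra hb2
          have ha2 : a.2 = false := by
            cases hb : a.2
            · rfl
            · exact absurd hb hb2
          exact hcmp (Or.inr ⟨h1, h2, ha2⟩)
        refine ⟨?_, ?_, ?_⟩
        · obtain ⟨e', he', hb⟩ := IH1
          exact ⟨e', by simp [he'], hb⟩
        · intro e' he'
          rcases List.mem_append.mp he' with h' | h'
          · exact IH2 e' h'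
          · simp at h'; subst h'; exact hbe
        · constructor
          · intro hb2
            obtain ⟨e', he', h1', h2'⟩ := IH3.mp hb2
            exact ⟨e', by simp [he'], h1', h2'⟩
          · rintro ⟨e', he', h1', h2'⟩
            rcases List.mem_append.mp he' with h' | h'
            · exact IH3.mpr ⟨e', h', h1', h2'⟩
            · simp at h'; subst h'
              exact himp h1' h2'

-- per-cell data (image distance, A's line key, B's direction key, payload vector)
def cDist (dx dy yx yy bx bY : Int) (c : Int × Int) : Int :=
  distA (mir dx bx c.2, mir dy bY c.1) (yx, yy)
def cLine (dx dy yx yy bx bY : Int) (c : Int × Int) : Int × Int × Int :=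
  lineA (mir dx bx c.2, mir dy bY c.1) (yx, yy)
def cVec (dx dy yx yy bx bY : Int) (c : Int × Int) : Int × Int :=
  (mir dx bx c.2 - yx, mir dy bY c.1 - yy)
def cDir (dx dy yx yy bx bY : Int) (c : Int × Int) : Int × Int :=
  redB (mir dx bx c.2 - yx) (mir dy bY c.1 - yy)

theorem stepA1_get? (dx dy yx yy tx ty dp : Int)
    (D : PySem.Dict (Int × Int × Int) (Int × (Int × Int))) (c : Int × Int) (l : Int × Int × Int) :
    (stepA1 dx dy yx yy tx ty dp D c.1 c.2).get? l =
      if cDist dx dy yx yy tx ty c ≤ dp ∧ cLine dx dy yx yy tx ty c = l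
      then updA (D.get? l) (cDist dx dy yx yy tx ty c, cVec dx dy yx yy tx ty c)
      else D.get? l := by
  simp only [stepA1, cDist, cLine, cVec]
  by_cases hd : distA (mir dx tx c.2, mir dy ty c.1) (yx, yy) ≤ dp
  · simp only [hd, if_true, true_and]
    by_cases hkl : lineA (mir dx tx c.2, mir dy ty c.1) (yx, yy) = l
    · subst hkl
      rw [if_pos rfl]
      by_cases hcont : D.contains (lineA (mir dx tx c.2, mir dy ty c.1) (yx, yy)) = true
      · have hissome : (D.get? (lineA (mir dx tx c.2, mir dy ty c.1) (yx, yy))).isSome := by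
          rw [← PySem.Dict.contains_eq_isSome_get?]; exact hcont
        obtain ⟨a, ha⟩ := Option.isSome_iff_exists.mp hissome
        have hgetD : D.getD (lineA (mir dx tx c.2, mir dy ty c.1) (yx, yy)) (0, (0, 0)) = a := by
          rw [PySem.Dict.getD_eq_get?_getD, ha]; rfl
        simp only [hcont, if_true, hgetD, ha, updA]
        by_cases hgt : a.1 > distA (mir dx tx c.2, mir dy ty c.1) (yx, yy)
        · simp only [hgt, if_true]
          rw [PySem.Dict.get?_insert, if_pos rfl]
        · simp only [hgt, if_false]
          rw [ha]
      · have hnone : D.get? (lineA (mir dx tx c.2, mir dy ty c.1) (yx, yy)) = none := by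
          rw [PySem.Dict.get?_eq_none_iff_contains]
          simpa using hcont
        have hcf : D.contains (lineA (mir dx tx c.2, mir dy ty c.1) (yx, yy)) = false := by
          simpa using hcont
        simp only [hcf, Bool.false_eq_true, if_false]
        rw [PySem.Dict.get?_insert, if_pos rfl, hnone]
        rfl
    · rw [if_neg hkl]
      split_ifs <;> first
        | rfl
        | rw [PySem.Dict.get?_insert, if_neg (fun hh => hkl hh.symm)]
  · simp only [hd, if_false, false_and]
theorem stepA2_get? (dx dy yx yy dp : Int)
    (D : PySem.Dict (Int × Int × Int) (Int × (Int × Int))) (c : Int × Int) (l : Int × Int × Int) :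
    (stepA2 dx dy yx yy dp D c.1 c.2).get? l =
      if cDist dx dy yx yy yx yy c ≤ dp ∧ cLine dx dy yx yy yx yy c = l
      then updD (D.get? l) (cDist dx dy yx yy yx yy c)
      else D.get? l := by
  simp only [stepA2, cDist, cLine]
  by_cases hd : distA (mir dx yx c.2, mir dy yy c.1) (yx, yy) ≤ dp
  · simp only [hd, if_true, true_and]
    by_cases hkl : lineA (mir dx yx c.2, mir dy yy c.1) (yx, yy) = l
    · subst hkl
      rw [if_pos rfl]
      by_cases hcont : D.contains (lineA (mir dx yx c.2, mir dy yy c.1) (yx, yy)) = true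
      · have hissome : (D.get? (lineA (mir dx yx c.2, mir dy yy c.1) (yx, yy))).isSome := by
          rw [← PySem.Dict.contains_eq_isSome_get?]; exact hcont
        obtain ⟨a, ha⟩ := Option.isSome_iff_exists.mp hissome
        have hgetD : D.getD (lineA (mir dx yx c.2, mir dy yy c.1) (yx, yy)) (0, (0, 0)) = a := by
          rw [PySem.Dict.getD_eq_get?_getD, ha]; rfl
        simp only [hcont, if_true, hgetD, ha, updD]
        by_cases hgt : a.1 > distA (mir dx yx c.2, mir dy yy c.1) (yx, yy)
        · simp only [hgt, if_true]
          rw [dict_get?_erase_self]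
        · simp only [hgt, if_false]
          rw [ha]
      · have hnone : D.get? (lineA (mir dx yx c.2, mir dy yy c.1) (yx, yy)) = none := by
          rw [PySem.Dict.get?_eq_none_iff_contains]
          simpa using hcont
        have hcf : D.contains (lineA (mir dx yx c.2, mir dy yy c.1) (yx, yy)) = false := by
          simpa using hcont
        simp only [hcf, Bool.false_eq_true, if_false]
        rw [hnone]
        rfl
    · rw [if_neg hkl]
      split_ifs <;> first
        | rfl
        | rw [dict_get?_erase_of_ne _ _ _ (fun hh => hkl hh.symm)]
  · simp only [hd, if_false, false_and]

theorem stepB_get? (yx yy dp : Int) (D : PySem.Dict (Int × Int) (Int × Bool))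
    (P : Int × Int) (o : Bool) (k : Int × Int) :
    (stepB yx yy dp D (P, o)).get? k =
      if distA P (yx, yy) ≤ dp ∧ redB (P.1 - yx) (P.2 - yy) = k
      then updB (D.get? k) (distA P (yx, yy), o)
      else D.get? k := by
  simp only [stepB]
  have hdist : (P.1 - yx) * (P.1 - yx) + (P.2 - yy) * (P.2 - yy) = distA P (yx, yy) := by
    simp only [distA]; ring
  rw [hdist]
  by_cases hd : distA P (yx, yy) > dp
  · rw [if_pos hd, if_neg (by rintro ⟨h1, -⟩; omega)]
  · rw [if_neg hd]
    by_cases hkl : redB (P.1 - yx) (P.2 - yy) = k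
    · subst hkl
      rw [if_pos ⟨by omega, rfl⟩]
      cases ha : D.get? (redB (P.1 - yx) (P.2 - yy)) with
      | none =>
        simp only [ha]
        rw [PySem.Dict.get?_insert, if_pos rfl]
        rfl
      | some cur =>
        simp only [ha, updB]
        by_cases hc : distA P (yx, yy) < cur.1 ∨
            (distA P (yx, yy) = cur.1 ∧ o = true ∧ cur.2 = false)
        · simp only [if_pos hc]
          rw [PySem.Dict.get?_insert, if_pos rfl]
        · simp only [if_neg hc]
          exact ha
    · rw [if_neg (by rintro ⟨-, h2⟩; exact hkl h2)]
      cases ha : D.get? (redB (P.1 - yx) (P.2 - yy)) with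
      | none =>
        simp only [ha]
        rw [PySem.Dict.get?_insert, if_neg (fun hh => hkl hh.symm)]
      | some cur =>
        simp only [ha]
        split
        · rw [PySem.Dict.get?_insert, if_neg (fun hh => hkl hh.symm)]
        · rfl

-- per-key event streams
def tEvts (dx dy yx yy tx ty dp : Int) (L : List (Int × Int)) (l : Int × Int × Int) :
    List (Int × (Int × Int)) :=
  L.flatMap (fun c =>
    if cDist dx dy yx yy tx ty c ≤ dp ∧ cLine dx dy yx yy tx ty c = l
    then [(cDist dx dy yx yy tx ty c, cVec dx dy yx yy tx ty c)] else [])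

def sEvts (dx dy yx yy dp : Int) (L : List (Int × Int)) (l : Int × Int × Int) : List Int :=
  L.flatMap (fun c =>
    if cDist dx dy yx yy yx yy c ≤ dp ∧ cLine dx dy yx yy yx yy c = l
    then [cDist dx dy yx yy yx yy c] else [])

def bEvts (dx dy yx yy tx ty dp : Int) (L : List (Int × Int)) (k : Int × Int) :
    List (Int × Bool) :=
  L.flatMap (fun c =>
    (if cDist dx dy yx yy tx ty c ≤ dp ∧ cDir dx dy yx yy tx ty c = k
     then [(cDist dx dy yx yy tx ty c, true)] else []) ++
    (if cDist dx dy yx yy yx yy c ≤ dp ∧ cDir dx dy yx yy yx yy c = k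
     then [(cDist dx dy yx yy yx yy c, false)] else []))

theorem foldA1_get? (dx dy yx yy tx ty dp : Int) (L : List (Int × Int))
    (D : PySem.Dict (Int × Int × Int) (Int × (Int × Int))) (l : Int × Int × Int) :
    ((L.foldl (fun D c => stepA1 dx dy yx yy tx ty dp D c.1 c.2) D).get? l)
      = (tEvts dx dy yx yy tx ty dp L l).foldl updA (D.get? l) := by
  induction L generalizing D with
  | nil => rfl
  | cons c L IH =>
    have hev : tEvts dx dy yx yy tx ty dp (c :: L) l =
        (if cDist dx dy yx yy tx ty c ≤ dp ∧ cLine dx dy yx yy tx ty c = l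
         then [(cDist dx dy yx yy tx ty c, cVec dx dy yx yy tx ty c)] else [])
        ++ tEvts dx dy yx yy tx ty dp L l := by
      rw [tEvts, List.flatMap_cons]
      rfl
    rw [List.foldl_cons, IH, hev, List.foldl_append, stepA1_get?]
    split
    · rw [List.foldl_cons, List.foldl_nil]
    · rw [List.foldl_nil]

theorem foldA2_get? (dx dy yx yy dp : Int) (L : List (Int × Int))
    (D : PySem.Dict (Int × Int × Int) (Int × (Int × Int))) (l : Int × Int × Int) :
    ((L.foldl (fun D c => stepA2 dx dy yx yy dp D c.1 c.2) D).get? l)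
      = (sEvts dx dy yx yy dp L l).foldl updD (D.get? l) := by
  induction L generalizing D with
  | nil => rfl
  | cons c L IH =>
    have hev : sEvts dx dy yx yy dp (c :: L) l =
        (if cDist dx dy yx yy yx yy c ≤ dp ∧ cLine dx dy yx yy yx yy c = l
         then [cDist dx dy yx yy yx yy c] else [])
        ++ sEvts dx dy yx yy dp L l := by
      rw [sEvts, List.flatMap_cons]
      rfl
    rw [List.foldl_cons, IH, hev, List.foldl_append, stepA2_get?]
    split
    · rw [List.foldl_cons, List.foldl_nil]
    · rw [List.foldl_nil]

theorem foldB_get? (dx dy yx yy tx ty dp : Int) (L : List (Int × Int))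
    (D : PySem.Dict (Int × Int) (Int × Bool)) (k : Int × Int) :
    ((L.foldl (fun D c =>
        stepB yx yy dp (stepB yx yy dp D ((mir dx tx c.2, mir dy ty c.1), true))
          ((mir dx yx c.2, mir dy yy c.1), false)) D).get? k)
      = (bEvts dx dy yx yy tx ty dp L k).foldl updB (D.get? k) := by
  induction L generalizing D with
  | nil => rfl
  | cons c L IH =>
    have hev : bEvts dx dy yx yy tx ty dp (c :: L) k =
        ((if cDist dx dy yx yy tx ty c ≤ dp ∧ cDir dx dy yx yy tx ty c = k
          then [(cDist dx dy yx yy tx ty c, true)] else []) ++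
         (if cDist dx dy yx yy yx yy c ≤ dp ∧ cDir dx dy yx yy yx yy c = k
          then [(cDist dx dy yx yy yx yy c, false)] else []))
        ++ bEvts dx dy yx yy tx ty dp L k := by
      rw [bEvts, List.flatMap_cons]
      rfl
    rw [List.foldl_cons, IH, hev, List.foldl_append, List.foldl_append, stepB_get?, stepB_get?]
    have e1 : distA (mir dx tx c.2, mir dy ty c.1) (yx, yy) = cDist dx dy yx yy tx ty c := rfl
    have e2 : redB ((mir dx tx c.2, mir dy ty c.1).1 - yx) ((mir dx tx c.2, mir dy ty c.1).2 - yy)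
        = cDir dx dy yx yy tx ty c := rfl
    have e3 : distA (mir dx yx c.2, mir dy yy c.1) (yx, yy) = cDist dx dy yx yy yx yy c := rfl
    have e4 : redB ((mir dx yx c.2, mir dy yy c.1).1 - yx) ((mir dx yx c.2, mir dy yy c.1).2 - yy)
        = cDir dx dy yx yy yx yy c := rfl
    rw [e1, e2, e3, e4]
    split <;> split <;> simp [List.foldl_cons, List.foldl_nil]

-- ---------- Phase 3: assembly ----------

theorem mirB_eq (d t x : Int) : mirB d t x = mir d t x := by
  unfold mir mirB
  rw [PySem.Int.mod_eq_emod_of_pos (by norm_num : (0:Int) < 2)]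
  rcases Int.emod_two_eq x with h | h <;> rw [h] <;> norm_num

def cells (batch : Int) : List (Int × Int) :=
  (PySem.List.pyRange (-batch) (batch + 1) 1).flatMap
    (fun y => (PySem.List.pyRange (-batch) (batch + 1) 1).map (fun x => (y, x)))

theorem nested_foldl {σ : Type} (g : σ → Int → Int → σ) (s : σ) (batch : Int) :
    (PySem.List.pyRange (-batch) (batch + 1) 1).foldl
        (fun D y => (PySem.List.pyRange (-batch) (batch + 1) 1).foldl (fun D x => g D y x) D) s
      = (cells batch).foldl (fun D c => g D c.1 c.2) s := by
  rw [cells, List.foldl_flatMap]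
  simp only [List.foldl_map]

theorem cLine_eq (dx dy yx yy bx bY : Int) (c : Int × Int) :
    cLine dx dy yx yy bx bY c = lineOf yx yy (cDir dx dy yx yy bx bY c) := by
  have h := lineA_normal yx yy (mir dx bx c.2 - yx) (mir dy bY c.1 - yy)
  have e1 : yx + (mir dx bx c.2 - yx) = mir dx bx c.2 := by ring
  have e2 : yy + (mir dy bY c.1 - yy) = mir dy bY c.1 := by ring
  rw [e1, e2] at h
  exact h

theorem mem_tEvts (dx dy yx yy tx ty dp : Int) (L : List (Int × Int)) (l : Int × Int × Int)
    (e : Int × (Int × Int)) :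
    e ∈ tEvts dx dy yx yy tx ty dp L l ↔
      ∃ c ∈ L, cDist dx dy yx yy tx ty c ≤ dp ∧ cLine dx dy yx yy tx ty c = l ∧
        e = (cDist dx dy yx yy tx ty c, cVec dx dy yx yy tx ty c) := by
  simp only [tEvts, List.mem_flatMap]
  constructor
  · rintro ⟨c, hc, he⟩
    split at he
    · rename_i hcond
      simp at he
      exact ⟨c, hc, hcond.1, hcond.2, he⟩
    · simp at he
  · rintro ⟨c, hc, h1, h2, h3⟩
    exact ⟨c, hc, by simp [h1, h2, h3]⟩

theorem mem_sEvts (dx dy yx yy dp : Int) (L : List (Int × Int)) (l : Int × Int × Int) (d : Int) :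
    d ∈ sEvts dx dy yx yy dp L l ↔
      ∃ c ∈ L, cDist dx dy yx yy yx yy c ≤ dp ∧ cLine dx dy yx yy yx yy c = l ∧
        d = cDist dx dy yx yy yx yy c := by
  simp only [sEvts, List.mem_flatMap]
  constructor
  · rintro ⟨c, hc, he⟩
    split at he
    · rename_i hcond
      simp at he
      exact ⟨c, hc, hcond.1, hcond.2, he⟩
    · simp at he
  · rintro ⟨c, hc, h1, h2, h3⟩
    exact ⟨c, hc, by simp [h1, h2, h3]⟩

theorem mem_bEvts (dx dy yx yy tx ty dp : Int) (L : List (Int × Int)) (k : Int × Int)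
    (e : Int × Bool) :
    e ∈ bEvts dx dy yx yy tx ty dp L k ↔
      ∃ c ∈ L,
        (cDist dx dy yx yy tx ty c ≤ dp ∧ cDir dx dy yx yy tx ty c = k ∧
          e = (cDist dx dy yx yy tx ty c, true)) ∨
        (cDist dx dy yx yy yx yy c ≤ dp ∧ cDir dx dy yx yy yx yy c = k ∧
          e = (cDist dx dy yx yy yx yy c, false)) := by
  simp only [bEvts, List.mem_flatMap, List.mem_append]
  constructor
  · rintro ⟨c, hc, he | he⟩ <;>
      [skip; skip] <;>
      · split at he
        · rename_i hcond
          simp at he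
          first
            | exact ⟨c, hc, Or.inl ⟨hcond.1, hcond.2, he⟩⟩
            | exact ⟨c, hc, Or.inr ⟨hcond.1, hcond.2, he⟩⟩
        · simp at he
  · rintro ⟨c, hc, ⟨h1, h2, h3⟩ | ⟨h1, h2, h3⟩⟩
    · exact ⟨c, hc, Or.inl (by simp [h1, h2, h3])⟩
    · exact ⟨c, hc, Or.inr (by simp [h1, h2, h3])⟩

-- the common survival predicate: direction k has a trainer image within range whose distance
-- is minimal among all trainer and self images in that direction
def PGood (dx dy yx yy tx ty dp : Int) (L : List (Int × Int)) (k : Int × Int) : Prop :=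
  ∃ c ∈ L, cDist dx dy yx yy tx ty c ≤ dp ∧ cDir dx dy yx yy tx ty c = k ∧
    (∀ c' ∈ L, cDist dx dy yx yy tx ty c' ≤ dp → cDir dx dy yx yy tx ty c' = k →
      cDist dx dy yx yy tx ty c ≤ cDist dx dy yx yy tx ty c') ∧
    (∀ c' ∈ L, cDist dx dy yx yy yx yy c' ≤ dp → cDir dx dy yx yy yx yy c' = k →
      cDist dx dy yx yy tx ty c ≤ cDist dx dy yx yy yx yy c')

theorem A_alive_iff (dx dy yx yy tx ty dp : Int) (L : List (Int × Int)) (l : Int × Int × Int) :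
    ((L.foldl (fun D c => stepA2 dx dy yx yy dp D c.1 c.2)
        (L.foldl (fun D c => stepA1 dx dy yx yy tx ty dp D c.1 c.2) PySem.Dict.empty)).get? l
      ≠ none)
    ↔ ∃ k, lineOf yx yy k = l ∧ PGood dx dy yx yy tx ty dp L k := by
  rw [foldA2_get?, foldA1_get?, PySem.Dict.get?_empty, foldD_char]
  cases ha : (tEvts dx dy yx yy tx ty dp L l).foldl updA none with
  | none =>
    simp only [ne_eq, not_true_eq_false, false_iff]
    rintro ⟨k, hk, c, hc, h1, h2, -, -⟩
    have hev : (cDist dx dy yx yy tx ty c, cVec dx dy yx yy tx ty c)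
        ∈ tEvts dx dy yx yy tx ty dp L l := by
      rw [mem_tEvts]
      exact ⟨c, hc, h1, by rw [cLine_eq, h2, hk], rfl⟩
    have := (foldA_none _).mp ha
    rw [this] at hev
    simp at hev
  | some m =>
    obtain ⟨⟨e0, he0, hm0⟩, hmin⟩ := foldA_min _ _ ha
    obtain ⟨c0, hc0, hd0, hl0, he0'⟩ := (mem_tEvts _ _ _ _ _ _ _ _ _ _).mp he0
    constructor
    · intro h
      have hnodel : ¬ ∃ d ∈ sEvts dx dy yx yy dp L l, d < m.1 := by
        intro hex
        simp only [if_pos hex] at h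
        exact h rfl
      refine ⟨cDir dx dy yx yy tx ty c0, ?_, c0, hc0, hd0, rfl, ?_, ?_⟩
      · rw [← cLine_eq, hl0]
      · intro c' hc' hd' hdir'
        have : m.1 ≤ cDist dx dy yx yy tx ty c' := by
          have hh := hmin (cDist dx dy yx yy tx ty c', cVec dx dy yx yy tx ty c')
            (by rw [mem_tEvts]; exact ⟨c', hc', hd', by rw [cLine_eq, hdir', ← cLine_eq, hl0], rfl⟩)
          simpa using hh
        have hc0d : cDist dx dy yx yy tx ty c0 = m.1 := by rw [hm0, he0']
        omega
      · intro c' hc' hd' hdir'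
        have hc0d : cDist dx dy yx yy tx ty c0 = m.1 := by rw [hm0, he0']
        have hmem : cDist dx dy yx yy yx yy c' ∈ sEvts dx dy yx yy dp L l := by
          rw [mem_sEvts]
          exact ⟨c', hc', hd', by rw [cLine_eq, hdir', ← cLine_eq, hl0], rfl⟩
        have : ¬ cDist dx dy yx yy yx yy c' < m.1 := fun hlt => hnodel ⟨_, hmem, hlt⟩
        omega
    · rintro ⟨k, hk, c, hc, h1, h2, h3, h4⟩
      have hnodel : ¬ ∃ d ∈ sEvts dx dy yx yy dp L l, d < m.1 := by
        rintro ⟨d, hd, hlt⟩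
        obtain ⟨c', hc', hd', hl', hde⟩ := (mem_sEvts _ _ _ _ _ _ _ _).mp hd
        have hdir' : cDir dx dy yx yy yx yy c' = k := by
          apply lineOf_inj yx yy
          rw [← cLine_eq, hl', hk]
        have hb := h4 c' hc' hd' hdir'
        have : m.1 ≤ cDist dx dy yx yy tx ty c := by
          have hh := hmin (cDist dx dy yx yy tx ty c, cVec dx dy yx yy tx ty c)
            (by rw [mem_tEvts]; exact ⟨c, hc, h1, by rw [cLine_eq, h2, hk], rfl⟩)
          simpa using hh
        omega
      simp only [if_neg hnodel]
      simp

theorem B_true_iff (dx dy yx yy tx ty dp : Int) (L : List (Int × Int)) (k : Int × Int) :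
    (∃ a, (L.foldl (fun D c =>
        stepB yx yy dp (stepB yx yy dp D ((mir dx tx c.2, mir dy ty c.1), true))
          ((mir dx yx c.2, mir dy yy c.1), false)) PySem.Dict.empty).get? k = some a ∧ a.2 = true)
    ↔ PGood dx dy yx yy tx ty dp L k := by
  rw [foldB_get?, PySem.Dict.get?_empty]
  constructor
  · rintro ⟨a, ha, ha2⟩
    obtain ⟨-, hmin, hown⟩ := foldB_min _ _ ha
    obtain ⟨e0, he0, hv0, htrue⟩ := hown.mp ha2
    obtain ⟨c0, hc0, hcase⟩ := (mem_bEvts _ _ _ _ _ _ _ _ _ _).mp he0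
    rcases hcase with ⟨h1, h2, h3⟩ | ⟨-, -, h3⟩
    · -- the minimal owner event is a trainer event at cell c0
      have hc0d : cDist dx dy yx yy tx ty c0 = a.1 := by
        rw [← hv0, h3]
      refine ⟨c0, hc0, h1, h2, ?_, ?_⟩
      · intro c' hc' hd' hdir'
        have hh := hmin (cDist dx dy yx yy tx ty c', true)
          (by rw [mem_bEvts]; exact ⟨c', hc', Or.inl ⟨hd', hdir', rfl⟩⟩)
        simp only at hh
        omega
      · intro c' hc' hd' hdir'
        have hh := hmin (cDist dx dy yx yy yx yy c', false)
          (by rw [mem_bEvts]; exact ⟨c', hc', Or.inr ⟨hd', hdir', rfl⟩⟩)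
        simp only at hh
        omega
    · rw [h3] at htrue
      simp at htrue
  · rintro ⟨c, hc, h1, h2, h3, h4⟩
    have hmemt : (cDist dx dy yx yy tx ty c, true) ∈ bEvts dx dy yx yy tx ty dp L k := by
      rw [mem_bEvts]
      exact ⟨c, hc, Or.inl ⟨h1, h2, rfl⟩⟩
    cases ha : (bEvts dx dy yx yy tx ty dp L k).foldl updB none with
    | none =>
      have := (foldB_none _).mp ha
      rw [this] at hmemt
      simp at hmemt
    | some a =>
      obtain ⟨⟨e0, he0, hm0⟩, hmin, hown⟩ := foldB_min _ _ ha
      have hale : a.1 ≤ cDist dx dy yx yy tx ty c := by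
        have hh := hmin _ hmemt
        simpa using hh
      have hge : cDist dx dy yx yy tx ty c ≤ a.1 := by
        obtain ⟨c', hc', hcase⟩ := (mem_bEvts _ _ _ _ _ _ _ _ _ _).mp he0
        rcases hcase with ⟨hd', hdir', h3'⟩ | ⟨hd', hdir', h3'⟩
        · have := h3 c' hc' hd' hdir'
          rw [hm0, h3']
          exact this
        · have := h4 c' hc' hd' hdir'
          rw [hm0, h3']
          exact this
      have haeq : a.1 = cDist dx dy yx yy tx ty c := by omega
      refine ⟨a, rfl, ?_⟩
      exact hown.mpr ⟨(cDist dx dy yx yy tx ty c, true), hmemt, by omega, rfl⟩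

def qB (D : PySem.Dict (Int × Int) (Int × Bool)) (k : Int × Int) : Bool :=
  match D.get? k with
  | some a => a.2
  | none => false

theorem dict_size_eq_card {κ ν : Type} [BEq κ] [DecidableEq κ] (D : PySem.Dict κ ν)
    (hn : D.keys.Nodup) : D.size = D.keys.toFinset.card := by
  rw [List.toFinset_card_of_nodup hn]
  simp [PySem.Dict.size, PySem.Dict.keys]

theorem dict_count_true (D : PySem.Dict (Int × Int) (Int × Bool)) (hn : D.keys.Nodup) :
    (D.values.filter (fun p => p.2)).length = (D.keys.filter (fun k => qB D k)).length := by
  have hv : D.values.filter (fun p => p.2)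
      = (D.items.filter (fun pr => pr.2.2)).map (fun x => x.2) := by
    have := List.filter_map (f := fun (x : (Int × Int) × (Int × Bool)) => x.2)
      (p := fun (p : Int × Bool) => p.2) (l := D.items)
    simpa [Function.comp] using this
  have hk : D.keys.filter (fun k => qB D k)
      = (D.items.filter (fun pr => qB D pr.1)).map (fun x => x.1) := by
    have := List.filter_map (f := fun (x : (Int × Int) × (Int × Bool)) => x.1)
      (p := fun k => qB D k) (l := D.items)
    simpa [Function.comp] using this
  have hcongr : D.items.filter (fun pr => qB D pr.1) = D.items.filter (fun pr => pr.2.2) := by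
    apply List.filter_congr
    intro pr hpr
    have hg : D.get? pr.1 = some pr.2 := PySem.Dict.get?_of_mem_items D hpr hn
    simp [qB, hg]
  rw [hv, hk, hcongr, List.length_map, List.length_map]

theorem stepA1_nodup (dx dy yx yy tx ty dp : Int)
    (D : PySem.Dict (Int × Int × Int) (Int × (Int × Int))) (y x : Int)
    (h : D.keys.Nodup) : (stepA1 dx dy yx yy tx ty dp D y x).keys.Nodup := by
  simp only [stepA1]
  split_ifs <;> first | exact h | exact PySem.Dict.nodup_keys_insert _ _ _ h

theorem stepA2_nodup (dx dy yx yy dp : Int)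
    (D : PySem.Dict (Int × Int × Int) (Int × (Int × Int))) (y x : Int)
    (h : D.keys.Nodup) : (stepA2 dx dy yx yy dp D y x).keys.Nodup := by
  simp only [stepA2]
  split_ifs <;> first | exact h | exact dict_nodup_keys_erase _ _ h

theorem stepB_nodup (yx yy dp : Int) (D : PySem.Dict (Int × Int) (Int × Bool))
    (e : (Int × Int) × Bool) (h : D.keys.Nodup) : (stepB yx yy dp D e).keys.Nodup := by
  simp only [stepB]
  split_ifs
  · exact h
  · split
    · exact PySem.Dict.nodup_keys_insert _ _ _ h
    · split_ifs
      · exact PySem.Dict.nodup_keys_insert _ _ _ h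
      · exact h

theorem foldA1_nodup (dx dy yx yy tx ty dp : Int) (L : List (Int × Int)) :
    (L.foldl (fun D c => stepA1 dx dy yx yy tx ty dp D c.1 c.2)
      (PySem.Dict.empty : PySem.Dict (Int × Int × Int) (Int × (Int × Int)))).keys.Nodup :=
  foldl_preserve _ _ (fun D c h => stepA1_nodup dx dy yx yy tx ty dp D c.1 c.2 h)
    L PySem.Dict.empty PySem.Dict.nodup_keys_empty

theorem foldA2_nodup (dx dy yx yy dp : Int) (L : List (Int × Int))
    (D : PySem.Dict (Int × Int × Int) (Int × (Int × Int))) (hD : D.keys.Nodup) :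
    (L.foldl (fun D c => stepA2 dx dy yx yy dp D c.1 c.2) D).keys.Nodup :=
  foldl_preserve _ _ (fun D c h => stepA2_nodup dx dy yx yy dp D c.1 c.2 h) L D hD

theorem foldB_nodup (dx dy yx yy tx ty dp : Int) (L : List (Int × Int)) :
    (L.foldl (fun D c =>
        stepB yx yy dp (stepB yx yy dp D ((mir dx tx c.2, mir dy ty c.1), true))
          ((mir dx yx c.2, mir dy yy c.1), false))
      (PySem.Dict.empty : PySem.Dict (Int × Int) (Int × Bool))).keys.Nodup := by
  have H : ∀ (L : List (Int × Int)) (D : PySem.Dict (Int × Int) (Int × Bool)), D.keys.Nodup →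
      (L.foldl (fun D c =>
        stepB yx yy dp (stepB yx yy dp D ((mir dx tx c.2, mir dy ty c.1), true))
          ((mir dx yx c.2, mir dy yy c.1), false)) D).keys.Nodup := by
    intro L
    induction L with
    | nil => intro D h; exact h
    | cons c L IH =>
      intro D h
      rw [List.foldl_cons]
      exact IH _ (stepB_nodup _ _ _ _ _ (stepB_nodup _ _ _ _ _ h))
  exact H L PySem.Dict.empty PySem.Dict.nodup_keys_empty

theorem counts_eq (dx dy yx yy tx ty dp : Int) (L : List (Int × Int)) :
    (((L.foldl (fun D c => stepA2 dx dy yx yy dp D c.1 c.2)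
        (L.foldl (fun D c => stepA1 dx dy yx yy tx ty dp D c.1 c.2)
          PySem.Dict.empty)).size : Nat) : Int)
      = (((L.foldl (fun D c =>
            stepB yx yy dp (stepB yx yy dp D ((mir dx tx c.2, mir dy ty c.1), true))
              ((mir dx yx c.2, mir dy yy c.1), false))
          PySem.Dict.empty).values.filter (fun p => p.2)).length : Int) := by
  set DA1 := L.foldl (fun D c => stepA1 dx dy yx yy tx ty dp D c.1 c.2)
    (PySem.Dict.empty : PySem.Dict (Int × Int × Int) (Int × (Int × Int))) with hDA1
  set DA := L.foldl (fun D c => stepA2 dx dy yx yy dp D c.1 c.2) DA1 with hDA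
  set DB := L.foldl (fun D c =>
      stepB yx yy dp (stepB yx yy dp D ((mir dx tx c.2, mir dy ty c.1), true))
        ((mir dx yx c.2, mir dy yy c.1), false))
    (PySem.Dict.empty : PySem.Dict (Int × Int) (Int × Bool)) with hDB
  have hA1n : DA1.keys.Nodup := by
    rw [hDA1]; exact foldA1_nodup dx dy yx yy tx ty dp L
  have hAn : DA.keys.Nodup := by
    rw [hDA]; exact foldA2_nodup dx dy yx yy dp L DA1 hA1n
  have hBn : DB.keys.Nodup := by
    rw [hDB]; exact foldB_nodup dx dy yx yy tx ty dp L
  have hBkey : ∀ k, (k ∈ DB.keys ∧ qB DB k = true) ↔ PGood dx dy yx yy tx ty dp L k := by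
    intro k
    rw [← B_true_iff dx dy yx yy tx ty dp L k, ← hDB]
    constructor
    · rintro ⟨hmem, hq⟩
      cases hg : DB.get? k with
      | none => simp [qB, hg] at hq
      | some a =>
        refine ⟨a, rfl, ?_⟩
        simpa [qB, hg] using hq
    · rintro ⟨a, ha, ha2⟩
      constructor
      · have : ¬ DB.get? k = none := by rw [ha]; simp
        rw [PySem.Dict.get?_eq_none_iff_not_mem_keys] at this
        simpa using this
      · simp [qB, ha, ha2]
  have hset : DA.keys.toFinset
      = ((DB.keys.filter (fun k => qB DB k)).toFinset).image (lineOf yx yy) := by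
    apply Finset.ext
    intro l
    rw [List.mem_toFinset, Finset.mem_image]
    constructor
    · intro hmem
      have hne : DA.get? l ≠ none := by
        intro hnone
        rw [PySem.Dict.get?_eq_none_iff_not_mem_keys] at hnone
        exact hnone hmem
      rw [hDA, hDA1] at hne
      obtain ⟨k, hk, hgood⟩ := (A_alive_iff dx dy yx yy tx ty dp L l).mp hne
      refine ⟨k, ?_, hk⟩
      rw [List.mem_toFinset, List.mem_filter]
      exact (hBkey k).mpr hgood
    · rintro ⟨k, hkmem, hk⟩
      rw [List.mem_toFinset, List.mem_filter] at hkmem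
      have hgood := (hBkey k).mp hkmem
      have hne : DA.get? l ≠ none := by
        rw [hDA, hDA1]
        exact (A_alive_iff dx dy yx yy tx ty dp L l).mpr ⟨k, hk, hgood⟩
      by_contra hnot
      exact hne ((PySem.Dict.get?_eq_none_iff_not_mem_keys _ _).mpr hnot)
  have hAcount : DA.size = DA.keys.toFinset.card := dict_size_eq_card DA hAn
  have hBcount : (DB.values.filter (fun p => p.2)).length
      = (DB.keys.filter (fun k => qB DB k)).toFinset.card := by
    rw [dict_count_true DB hBn, List.toFinset_card_of_nodup (hBn.filter _)]
  have hcard : DA.keys.toFinset.card = (DB.keys.filter (fun k => qB DB k)).toFinset.card := by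
    rw [hset, Finset.card_image_of_injective _ (lineOf_inj yx yy)]
  have : DA.size = (DB.values.filter (fun p => p.2)).length := by
    rw [hAcount, hBcount, hcard]
  exact_mod_cast congrArg (Nat.cast : Nat → Int) this

set_option maxHeartbeats 1000000 in
theorem main_eq (dx dy yx yy tx ty dist : Int) :
    solution [dx, dy] [yx, yy] [tx, ty] dist = solution_alt [dx, dy] [yx, yy] [tx, ty] dist := by
  simp only [solution, solution_alt, two?, mirB_eq, List.foldl_cons, List.foldl_nil]
  rw [nested_foldl (fun D y x => stepA1 dx dy yx yy tx ty (dist ^ 2) D y x),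
      nested_foldl (fun D y x => stepA2 dx dy yx yy (dist ^ 2) D y x),
      nested_foldl (fun D y x =>
        stepB yx yy (dist ^ 2) (stepB yx yy (dist ^ 2) D ((mir dx tx x, mir dy ty y), true))
          ((mir dx yx x, mir dy yy y), false))]
  exact counts_eq dx dy yx yy tx ty (dist ^ 2)
    (cells (PySem.Int.floordiv dist (min dx dy) + 1))

theorem solution_spec : Claim_equal_solution := by
  intro dimensions your_position trainer_position distance hdom hpre
  obtain ⟨h1, h2, h3, -⟩ := hpre
  obtain ⟨dx, dy, rfl⟩ := List.length_eq_two.mp h1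
  obtain ⟨yx, yy, rfl⟩ := List.length_eq_two.mp h2
  obtain ⟨tx, ty, rfl⟩ := List.length_eq_two.mp h3
  simp only [Spec_solution]
  exact main_eq dx dy yx yy tx ty distance
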